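-- pv_equiv track=rewrite | github.com/nicetpad2/NICEGOLD-ProjectP | agent/auto_fix/auto_fixer.py | _sort_imports
-- ===== SOURCE A (Python) =====
-- from typing import Dict, List, Any, Optional, Tuple
--
-- def _sort_imports(content: str) -> Tuple[str, bool]:
--     """Sort imports according to PEP 8."""
--     lines = content.splitlines()
--     import_lines = []
--     from_lines = []
--     other_lines = []
--     import_section = True
--
--     for line in lines:
--         stripped = line.strip()
--         if not stripped or stripped.startswith('#'):
--             if import_section:
--                 import_lines.append(line)
--             else:
--                 other_lines.append(line)
--         elif stripped.startswith('import '):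
--             import_lines.append(line)
--         elif stripped.startswith('from '):
--             from_lines.append(line)
--         else:
--             import_section = False
--             other_lines.append(line)
--
--     # Sort imports
--     sorted_imports = sorted(import_lines + from_lines, key=lambda x: x.strip().lower())
--
--     if sorted_imports != import_lines + from_lines:
--         return '\n'.join(sorted_imports + other_lines), True
--
--     return content, False
-- ===== SOURCE B (Python) =====
-- def _sort_imports(content):
--     """Sort imports according to PEP 8 (two-pass: locate the cut, then bucket by kind)."""
--     lines = content.splitlines()
--
--     def kind(line):
--         s = line.strip()
--         if not s or s.startswith('#'):
--             return 0  # blank or comment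
--         if s.startswith('import '):
--             return 1
--         if s.startswith('from '):
--             return 2
--         return 3  # first real code line ends the import section
--
--     cut = len(lines)
--     for i, line in enumerate(lines):
--         if kind(line) == 3:
--             cut = i
--             break
--
--     import_lines = [l for i, l in enumerate(lines)
--                     if kind(l) == 1 or (kind(l) == 0 and i < cut)]
--     from_lines = [l for l in lines if kind(l) == 2]
--     other_lines = [l for i, l in enumerate(lines)
--                    if kind(l) == 3 or (kind(l) == 0 and i >= cut)]
--
--     header = import_lines + from_lines
--     sorted_imports = sorted(header, key=lambda x: x.strip().lower())
--     if sorted_imports != header: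
--         return '\n'.join(sorted_imports + other_lines), True
--     return content, False
-- ===== Notes on version B (the rewrite author's own statement) =====
-- stated objective: alternative
-- what changed: Replaces A's single stateful pass (import_section flag mutated while bucketing) with a two-pass decomposition: first locate the cut index of the first code line, then build the three buckets by index-aware filters over enumerate(lines).
import Mathlib
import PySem

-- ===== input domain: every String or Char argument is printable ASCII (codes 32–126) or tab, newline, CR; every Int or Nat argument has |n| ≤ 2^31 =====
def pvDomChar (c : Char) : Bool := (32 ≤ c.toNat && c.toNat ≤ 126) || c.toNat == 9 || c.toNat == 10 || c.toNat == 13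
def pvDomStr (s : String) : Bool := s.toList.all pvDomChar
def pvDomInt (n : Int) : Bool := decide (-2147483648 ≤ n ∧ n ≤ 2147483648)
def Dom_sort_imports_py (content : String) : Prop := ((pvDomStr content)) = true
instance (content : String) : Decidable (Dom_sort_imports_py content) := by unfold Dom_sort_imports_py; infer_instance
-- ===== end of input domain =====

-- B replaces A's stateful one-pass bucketing (the import_section flag) by a two-pass
-- decomposition: first find the cut index of the first code line, then bucket by an
-- index-aware kind classification; same return value (objective: alternative).

-- ===== PORT A =====
-- A's loop over the lines with the import_section flag; builds the three buckets.
def loopA : List String → Bool → List String × List String × List String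
  | [], _ => ([], [], [])
  | l :: ls, flag =>
    let s := PySem.Str.strip l
    if s == "" || PySem.Str.startswith s "#" then
      let r := loopA ls flag
      if flag then (l :: r.1, r.2.1, r.2.2) else (r.1, r.2.1, l :: r.2.2)
    else if PySem.Str.startswith s "import " then
      let r := loopA ls flag
      (l :: r.1, r.2.1, r.2.2)
    else if PySem.Str.startswith s "from " then
      let r := loopA ls flag
      (r.1, l :: r.2.1, r.2.2)
    else
      let r := loopA ls false
      (r.1, r.2.1, l :: r.2.2)

def sort_imports_py (content : String) : String × Bool :=
  let lines := PySem.Str.splitlines content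
  let r := loopA lines true
  let importLines := r.1
  let fromLines := r.2.1
  let otherLines := r.2.2
  let sortedImports :=
    PySem.List.sorted (importLines ++ fromLines)
      (fun x => PySem.Str.lower (PySem.Str.strip x)) false
  if sortedImports ≠ importLines ++ fromLines then
    (PySem.Str.join "\n" (sortedImports ++ otherLines), true)
  else
    (content, false)

-- ===== PORT B =====
def kindOf (l : String) : Nat :=
  let s := PySem.Str.strip l
  if s == "" || PySem.Str.startswith s "#" then 0
  else if PySem.Str.startswith s "import " then 1
  else if PySem.Str.startswith s "from " then 2
  else 3

def sort_imports_py_alt (content : String) : String × Bool :=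
  let lines := PySem.Str.splitlines content
  -- the for-break loop locating the first code line
  let cut : Int :=
    (((PySem.List.enumerate lines 0).find? (fun p => kindOf p.2 == 3)).map (·.1)).getD
      (lines.length : Int)
  let importLines :=
    ((PySem.List.enumerate lines 0).filter
      (fun p => kindOf p.2 == 1 || (kindOf p.2 == 0 && decide (p.1 < cut)))).map (·.2)
  let fromLines := lines.filter (fun l => kindOf l == 2)
  let otherLines :=
    ((PySem.List.enumerate lines 0).filter
      (fun p => kindOf p.2 == 3 || (kindOf p.2 == 0 && decide (p.1 ≥ cut)))).map (·.2)
  let header := importLines ++ fromLines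
  let sortedImports :=
    PySem.List.sorted header (fun x => PySem.Str.lower (PySem.Str.strip x)) false
  if sortedImports ≠ header then
    (PySem.Str.join "\n" (sortedImports ++ otherLines), true)
  else
    (content, false)

-- ===== PRECONDITION & SPEC =====
def Spec_sort_imports_py (content : String) (out : String × Bool) : Prop := out = sort_imports_py_alt content
instance (content : String) (out : String × Bool) : Decidable (Spec_sort_imports_py content out) := by unfold Spec_sort_imports_py; infer_instance

-- ===== CLAIM (what is proved, stated in full; the proofs are below) =====
def Claim_equal_sort_imports_py : Prop := ∀ (content : String), Dom_sort_imports_py content → Spec_sort_imports_py content (sort_imports_py content)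

-- ===== LEMMAS AND PROOFS =====

-- cut value of the suffix ls when its first line has global index s
def cutVal (ls : List String) (s : Int) : Int :=
  (((PySem.List.enumerate ls s).find? (fun p => kindOf p.2 == 3)).map (·.1)).getD
    (s + ls.length)

theorem cutVal_cons (l : String) (ls : List String) (s : Int) :
    cutVal (l :: ls) s = if kindOf l = 3 then s else cutVal ls (s + 1) := by
  simp only [cutVal, PySem.List.enumerate_cons, List.find?_cons]
  by_cases h : kindOf l = 3
  · simp [h]
  · have hb : (kindOf l == 3) = false := by simp [h]
    simp only [hb, h, if_false]
    simp only [Option.getD]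
    cases List.find? (fun p => kindOf p.2 == 3) (PySem.List.enumerate ls (s + 1)) <;> simp <;> ring

theorem cutVal_ge (ls : List String) (s : Int) : s ≤ cutVal ls s := by
  induction ls generalizing s with
  | nil => simp [cutVal, PySem.List.enumerate_nil]
  | cons l ls ih =>
    rw [cutVal_cons]
    by_cases h : kindOf l = 3
    · simp [h]
    · simp only [h, if_false]
      have := ih (s + 1); omega

theorem kindOf_cases (l : String) :
    kindOf l = 0 ∨ kindOf l = 1 ∨ kindOf l = 2 ∨ kindOf l = 3 := by
  unfold kindOf; dsimp only; split_ifs <;> simp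

theorem kind0_bool (l : String) (h : kindOf l = 0) :
    (PySem.Str.strip l == "" || PySem.Str.startswith (PySem.Str.strip l) "#") = true := by
  unfold kindOf at h; dsimp only at h; split_ifs at h <;> simp_all

theorem kind1_bool (l : String) (h : kindOf l = 1) :
    (PySem.Str.strip l == "" || PySem.Str.startswith (PySem.Str.strip l) "#") = false ∧
    PySem.Str.startswith (PySem.Str.strip l) "import " = true := by
  unfold kindOf at h; dsimp only at h; split_ifs at h <;> simp_all

theorem kind2_bool (l : String) (h : kindOf l = 2) :
    (PySem.Str.strip l == "" || PySem.Str.startswith (PySem.Str.strip l) "#") = false ∧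
    PySem.Str.startswith (PySem.Str.strip l) "import " = false ∧
    PySem.Str.startswith (PySem.Str.strip l) "from " = true := by
  unfold kindOf at h; dsimp only at h; split_ifs at h <;> simp_all

theorem kind3_bool (l : String) (h : kindOf l = 3) :
    (PySem.Str.strip l == "" || PySem.Str.startswith (PySem.Str.strip l) "#") = false ∧
    PySem.Str.startswith (PySem.Str.strip l) "import " = false ∧
    PySem.Str.startswith (PySem.Str.strip l) "from " = false := by
  unfold kindOf at h; dsimp only at h; split_ifs at h <;> simp_all

-- dropping the indices from a filter whose condition ignores them
theorem filter_enumerate_snd (ls : List String) (s : Int) (f : String → Bool) :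
    ((PySem.List.enumerate ls s).filter (fun p => f p.2)).map (·.2) = ls.filter f := by
  induction ls generalizing s with
  | nil => simp [PySem.List.enumerate_nil]
  | cons l ls ih =>
    simp only [PySem.List.enumerate_cons, List.filter_cons]
    by_cases h : f l <;> simp [h, ih]

theorem loopA_false (ls : List String) :
    loopA ls false =
      (ls.filter (fun l => kindOf l == 1), ls.filter (fun l => kindOf l == 2),
       ls.filter (fun l => kindOf l == 3 || kindOf l == 0)) := by
  induction ls with
  | nil => simp [loopA]
  | cons l ls ih =>
    simp only [loopA, ih]
    rcases kindOf_cases l with h | h | h | h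
    · have h0 := kind0_bool l h
      rw [h0]
      simp [h, List.filter_cons]
    · obtain ⟨h0, h1⟩ := kind1_bool l h
      rw [h0, h1]
      simp [h, List.filter_cons]
    · obtain ⟨h0, h1, h2⟩ := kind2_bool l h
      rw [h0, h1, h2]
      simp [h, List.filter_cons]
    · obtain ⟨h0, h1, h2⟩ := kind3_bool l h
      rw [h0, h1, h2]
      simp [h, List.filter_cons]

theorem loopA_true (ls : List String) (s : Int) :
    loopA ls true =
      (((PySem.List.enumerate ls s).filter
          (fun p => kindOf p.2 == 1 || (kindOf p.2 == 0 && decide (p.1 < cutVal ls s)))).map (·.2),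
       ls.filter (fun l => kindOf l == 2),
       ((PySem.List.enumerate ls s).filter
          (fun p => kindOf p.2 == 3 || (kindOf p.2 == 0 && decide (p.1 ≥ cutVal ls s)))).map (·.2)) := by
  induction ls generalizing s with
  | nil => simp [loopA, PySem.List.enumerate_nil]
  | cons l ls ih =>
    rw [cutVal_cons]
    rcases kindOf_cases l with h | h | h | h
    · -- blank/comment: flag stays true, head goes to import_lines (s < cut since cut ≥ s+1)
      have h0 := kind0_bool l h
      have hge : s + 1 ≤ cutVal ls (s + 1) := cutVal_ge ls (s + 1)
      have hlt : s < cutVal ls (s + 1) := by omega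
      have hnge : ¬ (s ≥ cutVal ls (s + 1)) := by omega
      simp only [loopA]
      rw [h0]
      rw [ih (s + 1)]
      simp [h, hlt, hnge, PySem.List.enumerate_cons, List.filter_cons]
    · obtain ⟨h0, h1⟩ := kind1_bool l h
      simp only [loopA]
      rw [h0, h1]
      rw [ih (s + 1)]
      simp [h, PySem.List.enumerate_cons, List.filter_cons]
    · obtain ⟨h0, h1, h2⟩ := kind2_bool l h
      simp only [loopA]
      rw [h0, h1, h2]
      rw [ih (s + 1)]
      simp [h, PySem.List.enumerate_cons, List.filter_cons]
    · -- first code line: cut = s, the tail behaves like flag = false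
      obtain ⟨h0, h1, h2⟩ := kind3_bool l h
      simp only [loopA]
      rw [h0, h1, h2]
      rw [if_pos h]
      rw [loopA_false]
      have himp : ((PySem.List.enumerate ls (s + 1)).filter
          (fun p => kindOf p.2 == 1 || (kindOf p.2 == 0 && decide (p.1 < s)))) =
          ((PySem.List.enumerate ls (s + 1)).filter (fun p => kindOf p.2 == 1)) := by
        apply List.filter_congr
        intro p hp
        obtain ⟨k, hk, rfl⟩ := (PySem.List.mem_enumerate_iff _ _ _).1 hp
        have hlt : ¬ ((s + 1 + (k : Int)) < s) := by omega
        simp [hlt]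
      have hoth : ((PySem.List.enumerate ls (s + 1)).filter
          (fun p => kindOf p.2 == 3 || (kindOf p.2 == 0 && decide (p.1 ≥ s)))) =
          ((PySem.List.enumerate ls (s + 1)).filter
            (fun p => kindOf p.2 == 3 || kindOf p.2 == 0)) := by
        apply List.filter_congr
        intro p hp
        obtain ⟨k, hk, rfl⟩ := (PySem.List.mem_enumerate_iff _ _ _).1 hp
        have hge : (s + 1 + (k : Int)) ≥ s := by omega
        simp [hge]
      simp only [PySem.List.enumerate_cons, List.filter_cons]
      simp only [himp, hoth]
      simp [h, filter_enumerate_snd ls (s + 1) (fun x => kindOf x == 1),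
        filter_enumerate_snd ls (s + 1) (fun x => kindOf x == 3 || kindOf x == 0)]

-- ===== VERDICT (by name: the statement is the Claim_ definition above) =====
theorem sort_imports_py_spec : Claim_equal_sort_imports_py := by
  intro content _
  unfold Spec_sort_imports_py sort_imports_py sort_imports_py_alt
  have h := loopA_true (PySem.Str.splitlines content) 0
  have hcut : cutVal (PySem.Str.splitlines content) 0 =
      (((PySem.List.enumerate (PySem.Str.splitlines content) 0).find?
          (fun p => kindOf p.2 == 3)).map (·.1)).getD
        ((PySem.Str.splitlines content).length : Int) := by
    simp [cutVal]
  rw [hcut] at h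
  simp only [h]
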